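-- pv_equiv track=rewrite | github.com/Terra2Mensa/SQLandOptimizer | src/budget_workbook.py | _get_period_col_info
-- ===== SOURCE A (Python) =====
-- def _get_period_col_info(headers, start_col):
--     """Return (month_cols, quarter_cols_with_months, annual_col)."""
--     month_cols = []
--     quarter_groups = []
--     current_q_months = []
--     annual_col = None
--     for i, (htype, label, _, _) in enumerate(headers):
--         col = start_col + i
--         if htype == "month":
--             month_cols.append(col)
--             current_q_months.append(col)
--         elif htype == "quarter":
--             quarter_groups.append((col, list(current_q_months)))
--             current_q_months = []
--         elif htype == "annual":
--             annual_col = col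
--     return month_cols, quarter_groups, annual_col
-- ===== SOURCE B (Python) =====
-- def _get_period_col_info(headers, start_col):
--     """Return (month_cols, quarter_cols_with_months, annual_col)."""
--     types = [h[0] for h in headers]
--     month_cols = [start_col + i for i, t in enumerate(types) if t == "month"]
--     annual_idx = [i for i, t in enumerate(types) if t == "annual"]
--     annual_col = start_col + annual_idx[-1] if annual_idx else None
--     q_idx = [i for i, t in enumerate(types) if t == "quarter"]
--     quarter_groups = [
--         (start_col + i, [start_col + j for j in range(p + 1, i) if types[j] == "month"])
--         for p, i in zip([-1] + q_idx, q_idx)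
--     ]
--     return month_cols, quarter_groups, annual_col
-- ===== Notes on version B (the rewrite author's own statement) =====
-- stated objective: alternative
-- what changed: Replaces the single stateful accumulator loop (running month list reset at each quarter) by independent comprehensions over the enumerated header types plus a segmentation of month indices between consecutive quarter boundaries via zip([-1]+q_idx, q_idx).
import Mathlib
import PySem

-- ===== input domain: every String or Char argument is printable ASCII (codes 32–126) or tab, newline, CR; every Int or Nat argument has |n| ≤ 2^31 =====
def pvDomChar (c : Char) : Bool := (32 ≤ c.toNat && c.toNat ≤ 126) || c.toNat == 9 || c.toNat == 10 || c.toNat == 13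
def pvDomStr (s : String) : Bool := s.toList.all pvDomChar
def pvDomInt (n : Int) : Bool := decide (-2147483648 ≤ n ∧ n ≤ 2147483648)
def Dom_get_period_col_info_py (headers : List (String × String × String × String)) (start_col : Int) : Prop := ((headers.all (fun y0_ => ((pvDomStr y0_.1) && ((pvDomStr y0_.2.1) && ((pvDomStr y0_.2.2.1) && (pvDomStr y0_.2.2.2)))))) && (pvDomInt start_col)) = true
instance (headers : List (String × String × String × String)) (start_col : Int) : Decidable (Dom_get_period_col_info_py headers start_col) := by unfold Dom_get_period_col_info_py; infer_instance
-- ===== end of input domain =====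

-- B replaces A's single stateful accumulator loop by independent filters over the
-- enumerated header types plus a segmentation of months between consecutive quarter
-- boundaries (objective: alternative decomposition, same cost).

-- ===== PORT A =====
-- A's loop step: state = (month_cols, quarter_groups, current_q_months, annual_col)
def pvStepA (start_col : Int)
    (st : List Int × List (Int × List Int) × List Int × Option Int)
    (p : Int × (String × String × String × String)) :
    List Int × List (Int × List Int) × List Int × Option Int :=
  let col := start_col + p.1
  let htype := p.2.1
  if htype = "month" then (st.1 ++ [col], st.2.1, st.2.2.1 ++ [col], st.2.2.2)
  else if htype = "quarter" then (st.1, st.2.1 ++ [(col, st.2.2.1)], [], st.2.2.2)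
  else if htype = "annual" then (st.1, st.2.1, st.2.2.1, some col)
  else st

def get_period_col_info_py (headers : List (String × String × String × String)) (start_col : Int) : List Int × (List (Int × List Int)) × Option Int :=
  let r := (PySem.List.enumerate headers 0).foldl (pvStepA start_col) ([], [], [], none)
  (r.1, r.2.1, r.2.2.2)

-- ===== PORT B =====
def get_period_col_info_py_alt (headers : List (String × String × String × String)) (start_col : Int) : List Int × (List (Int × List Int)) × Option Int :=
  let types : List String := headers.map (·.1)
  let month_cols := ((PySem.List.enumerate types 0).filter (fun p => p.2 == "month")).map
      (fun p => start_col + p.1)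
  let annual_idx := ((PySem.List.enumerate types 0).filter (fun p => p.2 == "annual")).map (·.1)
  let annual_col := annual_idx.getLast?.map (fun i => start_col + i)
  let q_idx := ((PySem.List.enumerate types 0).filter (fun p => p.2 == "quarter")).map (·.1)
  let quarter_groups := (((-1 : Int) :: q_idx).zip q_idx).map (fun pi =>
      (start_col + pi.2,
       ((PySem.List.pyRange (pi.1 + 1) pi.2 1).filter
          (fun j => PySem.List.pyGet? types j == some "month")).map (fun j => start_col + j)))
  (month_cols, quarter_groups, annual_col)

-- ===== PRECONDITION & SPEC =====
def Spec_get_period_col_info_py (headers : List (String × String × String × String)) (start_col : Int) (out : List Int × (List (Int × List Int)) × Option Int) : Prop := out = get_period_col_info_py_alt headers start_col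
instance (headers : List (String × String × String × String)) (start_col : Int) (out : List Int × (List (Int × List Int)) × Option Int) : Decidable (Spec_get_period_col_info_py headers start_col out) := by unfold Spec_get_period_col_info_py; infer_instance

-- ===== CLAIM (what is proved, stated in full; the proofs are below) =====
def Claim_equal_get_period_col_info_py : Prop := ∀ (headers : List (String × String × String × String)) (start_col : Int), Dom_get_period_col_info_py headers start_col → Spec_get_period_col_info_py headers start_col (get_period_col_info_py headers start_col)

-- ===== LEMMAS AND PROOFS =====

-- B's components, named for the proofs (definitionally B's code on types = headers.map (·.1))
def pvMonths (s : Int) (ts : List String) : List Int :=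
  ((PySem.List.enumerate ts 0).filter (fun p => p.2 == "month")).map (fun p => s + p.1)
def pvQIdx (ts : List String) : List Int :=
  ((PySem.List.enumerate ts 0).filter (fun p => p.2 == "quarter")).map (·.1)
def pvAIdx (ts : List String) : List Int :=
  ((PySem.List.enumerate ts 0).filter (fun p => p.2 == "annual")).map (·.1)
def pvSeg (s : Int) (ts : List String) (a b : Int) : List Int :=
  ((PySem.List.pyRange a b 1).filter (fun j => PySem.List.pyGet? ts j == some "month")).map
    (fun j => s + j)
def pvGroups (s : Int) (ts : List String) : List (Int × List Int) :=
  (((-1 : Int) :: pvQIdx ts).zip (pvQIdx ts)).map (fun pi => (s + pi.2, pvSeg s ts (pi.1 + 1) pi.2))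

lemma alt_eq (headers : List (String × String × String × String)) (s : Int) :
    get_period_col_info_py_alt headers s =
      (pvMonths s (headers.map (·.1)), pvGroups s (headers.map (·.1)),
       (pvAIdx (headers.map (·.1))).getLast?.map (fun i => s + i)) := rfl

lemma mem_pvQIdx {ts : List String} {i : Int} (h : i ∈ pvQIdx ts) :
    0 ≤ i ∧ i < (ts.length : Int) := by
  simp only [pvQIdx, List.mem_map, List.mem_filter] at h
  obtain ⟨p, ⟨hp, _⟩, rfl⟩ := h
  obtain ⟨k, hk, rfl⟩ := (PySem.List.mem_enumerate_iff ts 0 p).mp hp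
  constructor
  · simp
  · simp
    exact_mod_cast hk

lemma pvSeg_append {ts : List String} {t : String} {s a b : Int}
    (ha : 0 ≤ a) (hb : b ≤ (ts.length : Int)) :
    pvSeg s (ts ++ [t]) a b = pvSeg s ts a b := by
  unfold pvSeg
  congr 1
  apply List.filter_congr
  intro j hj
  obtain ⟨h1, h2⟩ := (PySem.List.mem_pyRange_one).mp hj
  have h0 : (0:Int) ≤ j := le_trans ha h1
  rw [PySem.List.pyGet?_of_nonneg _ h0, PySem.List.pyGet?_of_nonneg _ h0,
      List.getElem?_append_left (by omega)]

lemma getLastD_mem_cons {l : List Int} {d : Int} : l.getLastD d = d ∨ l.getLastD d ∈ l := by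
  cases h : l.getLast? with
  | none => left; simp [List.getLastD_eq_getLast?, h]
  | some x =>
    right
    rw [List.getLastD_eq_getLast?, h]
    exact List.mem_of_getLast? h

lemma zip_snoc {l1 l2 : List Int} (h : l1.length = l2.length + 1) (u v d : Int) :
    (l1 ++ [u]).zip (l2 ++ [v]) = l1.zip l2 ++ [(l1.getLastD d, v)] := by
  induction l2 generalizing l1 with
  | nil =>
    match l1, h with
    | [a], _ => simp
  | cons y ys ih =>
    match l1, h with
    | a :: as, h =>
      have hlen : as.length = ys.length + 1 := by simpa using h
      have hne : as ≠ [] := by intro hh; simp [hh] at hlen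
      obtain ⟨x, hx⟩ := Option.isSome_iff_exists.mp (List.getLast?_isSome.mpr hne)
      simp only [List.cons_append, List.zip_cons_cons, ih hlen]
      simp [List.getLastD_eq_getLast?, List.getLast?_cons, hx]

lemma pvMonths_append (s : Int) (ts : List String) (t : String) :
    pvMonths s (ts ++ [t]) =
      pvMonths s ts ++ (if t == "month" then [s + (ts.length : Int)] else []) := by
  unfold pvMonths
  rw [PySem.List.enumerate_append, PySem.List.enumerate_cons, PySem.List.enumerate_nil,
      List.filter_append, List.map_append]
  congr 1
  split <;> simp_all

lemma pvQIdx_append (ts : List String) (t : String) :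
    pvQIdx (ts ++ [t]) =
      pvQIdx ts ++ (if t == "quarter" then [(ts.length : Int)] else []) := by
  unfold pvQIdx
  rw [PySem.List.enumerate_append, PySem.List.enumerate_cons, PySem.List.enumerate_nil,
      List.filter_append, List.map_append]
  congr 1
  split <;> simp_all

lemma pvAIdx_append (ts : List String) (t : String) :
    pvAIdx (ts ++ [t]) =
      pvAIdx ts ++ (if t == "annual" then [(ts.length : Int)] else []) := by
  unfold pvAIdx
  rw [PySem.List.enumerate_append, PySem.List.enumerate_cons, PySem.List.enumerate_nil,
      List.filter_append, List.map_append]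
  congr 1
  split <;> simp_all

lemma pvSeg_snoc (s : Int) (ts : List String) (t : String) {a : Int}
    (ha : 0 ≤ a) (hb : a ≤ (ts.length : Int)) :
    pvSeg s (ts ++ [t]) a ((ts.length : Int) + 1) =
      pvSeg s ts a (ts.length : Int) ++ (if t == "month" then [s + (ts.length : Int)] else []) := by
  rw [show pvSeg s (ts ++ [t]) a ((ts.length : Int) + 1)
        = pvSeg s (ts ++ [t]) a (ts.length : Int) ++
          ((([ (ts.length : Int) ]).filter
            (fun j => PySem.List.pyGet? (ts ++ [t]) j == some "month")).map (fun j => s + j))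
      from ?_, pvSeg_append ha le_rfl]
  · congr 1
    have hget : PySem.List.pyGet? (ts ++ [t]) (ts.length : Int) = some t := by
      rw [PySem.List.pyGet?_natCast, List.getElem?_concat_length]
    simp only [List.filter, hget]
    split <;> simp_all
  · unfold pvSeg
    rw [PySem.List.pyRange_one_succ_right hb, List.filter_append, List.map_append]

lemma pvGroups_append_of_ne (s : Int) (ts : List String) (t : String)
    (h : (t == "quarter") = false) : pvGroups s (ts ++ [t]) = pvGroups s ts := by
  unfold pvGroups
  rw [pvQIdx_append ts t, h]
  simp only [Bool.false_eq_true, if_false, List.append_nil]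
  apply List.map_congr_left
  intro pi hpi
  obtain ⟨h1, h2⟩ := List.of_mem_zip (a := pi.1) (b := pi.2) (by simpa using hpi)
  have hb := mem_pvQIdx h2
  have ha : -1 ≤ pi.1 := by
    rcases List.mem_cons.mp h1 with h1' | hm
    · omega
    · exact le_of_lt (lt_of_lt_of_le (by omega) (mem_pvQIdx hm).1)
  rw [pvSeg_append (by omega) (le_of_lt hb.2)]

lemma pvGroups_append_quarter (s : Int) (ts : List String) (t : String)
    (h : (t == "quarter") = true) :
    pvGroups s (ts ++ [t]) = pvGroups s ts ++
      [(s + (ts.length : Int),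
        pvSeg s ts ((pvQIdx ts).getLastD (-1) + 1) (ts.length : Int))] := by
  have hp1 : -1 ≤ (pvQIdx ts).getLastD (-1) := by
    rcases getLastD_mem_cons (l := pvQIdx ts) (d := -1) with hh | hh
    · omega
    · have := mem_pvQIdx hh; omega
  unfold pvGroups
  rw [pvQIdx_append ts t, h]
  simp only [if_true]
  rw [show ((-1:Int) :: (pvQIdx ts ++ [(ts.length : Int)]))
        = ((-1:Int) :: pvQIdx ts) ++ [(ts.length : Int)] from rfl,
      zip_snoc (by simp) _ _ (-1), List.map_append, List.getLastD_cons]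
  congr 1
  · apply List.map_congr_left
    intro pi hpi
    obtain ⟨h1, h2⟩ := List.of_mem_zip (a := pi.1) (b := pi.2) (by simpa using hpi)
    have hb := mem_pvQIdx h2
    have ha : -1 ≤ pi.1 := by
      rcases List.mem_cons.mp h1 with h1' | hm
      · omega
      · exact le_of_lt (lt_of_lt_of_le (by omega) (mem_pvQIdx hm).1)
    rw [pvSeg_append (by omega) (le_of_lt hb.2)]
  · simp only [List.map_cons, List.map_nil]
    rw [pvSeg_append (by omega) le_rfl]

lemma pvQIdx_getLastD_quarter (ts : List String) (t : String)
    (h : (t == "quarter") = true) :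
    (pvQIdx (ts ++ [t])).getLastD (-1) = (ts.length : Int) := by
  rw [pvQIdx_append ts t, h]
  simp

lemma pvQIdx_getLastD_of_ne (ts : List String) (t : String)
    (h : (t == "quarter") = false) :
    (pvQIdx (ts ++ [t])).getLastD (-1) = (pvQIdx ts).getLastD (-1) := by
  rw [pvQIdx_append ts t, h]
  simp

lemma prev_lt {ts : List String} : -1 ≤ (pvQIdx ts).getLastD (-1) ∧
    (pvQIdx ts).getLastD (-1) < (ts.length : Int) := by
  rcases getLastD_mem_cons (l := pvQIdx ts) (d := -1) with h | h
  · rw [h]; constructor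
    · omega
    · have : (0:Int) ≤ (ts.length : Int) := by positivity
      omega
  · have := mem_pvQIdx h; omega

lemma foldA_eq (s : Int) (hs : List (String × String × String × String)) :
    (PySem.List.enumerate hs 0).foldl (pvStepA s) ([], [], [], none) =
      (pvMonths s (hs.map (·.1)), pvGroups s (hs.map (·.1)),
       pvSeg s (hs.map (·.1)) ((pvQIdx (hs.map (·.1))).getLastD (-1) + 1) (hs.length : Int),
       (pvAIdx (hs.map (·.1))).getLast?.map (fun i => s + i)) := by
  induction hs using List.reverseRecOn with
  | nil =>
    simp [pvMonths, pvQIdx, pvAIdx, pvGroups, pvSeg, PySem.List.enumerate_nil,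
      PySem.List.pyRange_one_eq_nil]
  | append_singleton l x ih =>
    rw [PySem.List.enumerate_append, PySem.List.enumerate_cons, PySem.List.enumerate_nil,
        List.foldl_append, ih, List.map_append]
    simp only [List.map_cons, List.map_nil]
    set ts := l.map (·.1) with hts
    have hlen : ((l.length : Int)) = (ts.length : Int) := by simp [hts]
    obtain ⟨hp1, hp2⟩ := prev_lt (ts := ts)
    have hlen' : ((l ++ [x]).length : Int) = (ts.length : Int) + 1 := by simp [hts]
    simp only [List.foldl_cons, List.foldl_nil, pvStepA, zero_add]
    rw [hlen', hlen]
    by_cases hm : x.1 = "month"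
    · have hbm : (x.1 == "month") = true := by simp [hm]
      have hmq : (x.1 == "quarter") = false := by simp [hm]
      have hma : (x.1 == "annual") = false := by simp [hm]
      rw [if_pos hm, pvMonths_append, pvAIdx_append, pvGroups_append_of_ne _ _ _ hmq,
          pvQIdx_getLastD_of_ne ts x.1 hmq, pvSeg_snoc s ts x.1 (by omega) (by omega),
          hbm, hma]
      simp
    · rw [if_neg hm]
      have hmm : (x.1 == "month") = false := by simp [hm]
      by_cases hq : x.1 = "quarter"
      · have hbq : (x.1 == "quarter") = true := by simp [hq]
        have hqa : (x.1 == "annual") = false := by simp [hq]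
        rw [if_pos hq, pvMonths_append, pvAIdx_append, pvGroups_append_quarter s ts x.1 hbq,
            pvQIdx_getLastD_quarter ts x.1 hbq, hmm, hqa]
        have hseg : pvSeg s (ts ++ [x.1]) ((ts.length : Int) + 1) ((ts.length : Int) + 1) = [] := by
          unfold pvSeg
          rw [PySem.List.pyRange_one_eq_nil le_rfl]
          simp
        rw [hseg]
        simp
      · rw [if_neg hq]
        have hqq : (x.1 == "quarter") = false := by simp [hq]
        by_cases hA : x.1 = "annual"
        · have hba : (x.1 == "annual") = true := by simp [hA]
          rw [if_pos hA, pvMonths_append, pvAIdx_append, pvGroups_append_of_ne _ _ _ hqq,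
              pvQIdx_getLastD_of_ne ts x.1 hqq, pvSeg_snoc s ts x.1 (by omega) (by omega),
              hmm, hba]
          simp
        · rw [if_neg hA]
          have hba : (x.1 == "annual") = false := by simp [hA]
          rw [pvMonths_append, pvAIdx_append, pvGroups_append_of_ne _ _ _ hqq,
              pvQIdx_getLastD_of_ne ts x.1 hqq, pvSeg_snoc s ts x.1 (by omega) (by omega),
              hmm, hba]
          simp

-- ===== VERDICT (by name: the statement is the Claim_ definition above) =====
theorem get_period_col_info_py_spec : Claim_equal_get_period_col_info_py := by
  intro headers s _
  show get_period_col_info_py headers s = get_period_col_info_py_alt headers s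
  rw [alt_eq]
  unfold get_period_col_info_py
  rw [foldA_eq]
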